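-- pv_equiv track=rewrite | github.com/antoniojsp/retos | data_annotation/achilles/closest_in_grid_find/test1.py | find_closest_neighbors
-- ===== SOURCE A (Python) =====
-- def find_closest_neighbors(grid):
--     """Analyzes a grid of cells and identifies the closest neighbors for each node.
--
--     Args:
--       grid: A list of strings representing the grid. Each string represents a row
--             in the grid, where '.' represents an empty cell and '0' represents a
--             cell containing a node.
--
--     Returns:
--       A list of strings. Each string represents the coordinates of a node and its
--       closest neighbors in the format 'x1 y1 x2 y2 x3 y3', where:
--         (x1, y1): The coordinates of the node.
--         (x2, y2): The coordinates of the closest neighbor to the right of the node.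
--         (x3, y3): The coordinates of the closest neighbor below the node.
--       If a neighbor does not exist, the corresponding coordinates should be '-1 -1'.
--     """
--     height = len(grid)
--     width = len(grid[0])
--     output = []
--
--     for y in range(height):
--         for x in range(width):
--             if grid[y][x] == '0':
--                 x1, y1 = x, y
--                 x2, y2 = -1, -1
--                 x3, y3 = -1, -1
--
--                 for x_neighbor in range(x + 1, width):
--                     if grid[y][x_neighbor] == '0':
--                         x2, y2 = x_neighbor, y
--                         break
--
--                 for y_neighbor in range(y + 1, height):
--                     if grid[y_neighbor][x] == '0':
--                         x3, y3 = x, y_neighbor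
--                         break
--
--                 output.append(f"{x1} {y1} {x2} {y2} {x3} {y3}")
--
--     return output
-- ===== SOURCE B (Python) =====
-- def find_closest_neighbors(grid):
--     height = len(grid)
--     width = len(grid[0])
--     # suffix scan bottom-up: below[y][x] = row index of nearest node strictly below (y, x), else -1
--     below = []
--     nxt = [-1] * width
--     for y in range(height - 1, -1, -1):
--         below.append(nxt)
--         row = grid[y]
--         nxt = [y if row[x] == '0' else nxt[x] for x in range(width)]
--     below.reverse()
--
--     out = []
--     for y in range(height):
--         row = grid[y]
--         b = below[y]
--         entries = []
--         right = -1  # nearest node index to the right of the current x, scanning right-to-left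
--         for x in range(width - 1, -1, -1):
--             if row[x] == '0':
--                 r = f"{right} {y}" if right != -1 else "-1 -1"
--                 d = f"{x} {b[x]}" if b[x] != -1 else "-1 -1"
--                 entries.append(f"{x} {y} {r} {d}")
--                 right = x
--         entries.reverse()
--         out.extend(entries)
--     return out
-- ===== Notes on version B (the rewrite author's own statement) =====
-- stated objective: alternative
-- what changed: Replaces A's per-node linear rescans to the right and downward by two suffix scans: a bottom-up pass precomputing the nearest node below every cell per column, and a per-row right-to-left pass carrying the nearest node to the right, so each cell is touched O(1) times.
import Mathlib
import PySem

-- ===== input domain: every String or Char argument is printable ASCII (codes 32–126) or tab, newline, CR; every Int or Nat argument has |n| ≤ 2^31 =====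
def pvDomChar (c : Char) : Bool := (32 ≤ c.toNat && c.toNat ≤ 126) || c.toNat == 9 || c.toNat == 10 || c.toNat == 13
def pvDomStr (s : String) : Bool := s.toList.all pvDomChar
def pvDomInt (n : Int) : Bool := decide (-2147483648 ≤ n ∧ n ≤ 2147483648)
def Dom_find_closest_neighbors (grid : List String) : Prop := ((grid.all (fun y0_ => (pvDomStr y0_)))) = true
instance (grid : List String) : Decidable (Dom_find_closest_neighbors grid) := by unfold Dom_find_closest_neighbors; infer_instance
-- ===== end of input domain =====

-- B (alternative algorithm): instead of A's per-node rightward/downward rescans, two suffix scans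
-- (nearest node below per column, bottom-up; nearest node to the right per row, right-to-left).


-- ===== PORT A =====
-- grid[y][x] == '0'; the default ' ' is never hit on Pre_ (all indices in range there)
def pvCell (grid : List String) (y x : Nat) : Bool :=
  ((grid.getD y "").toList.getD x ' ') == '0'

-- A's for-loop-with-break over x+1..width-1: first hit = find? over the range
def pvScanRight (grid : List String) (y width x : Nat) : Int × Int :=
  match (List.range' (x+1) (width - (x+1))).find? (fun xn => pvCell grid y xn) with
  | some xn => ((xn : Int), (y : Int))
  | none => (-1, -1)

def pvScanDown (grid : List String) (height y x : Nat) : Int × Int :=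
  match (List.range' (y+1) (height - (y+1))).find? (fun yn => pvCell grid yn x) with
  | some yn => ((x : Int), (yn : Int))
  | none => (-1, -1)

-- f"{x1} {y1} {x2} {y2} {x3} {y3}" (built on List Char; String.ofList at the end)
def pvFmt6 (x1 y1 x2 y2 x3 y3 : Int) : String :=
  String.ofList (PySem.Int.toChars x1 ++ [' '] ++ PySem.Int.toChars y1 ++ [' ']
    ++ PySem.Int.toChars x2 ++ [' '] ++ PySem.Int.toChars y2 ++ [' ']
    ++ PySem.Int.toChars x3 ++ [' '] ++ PySem.Int.toChars y3)

def find_closest_neighbors (grid : List String) : List String :=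
  let height := grid.length
  let width := (grid.getD 0 "").toList.length
  (List.range height).foldl (fun output y =>
    (List.range width).foldl (fun output x =>
      if pvCell grid y x then
        let p2 := pvScanRight grid y width x
        let p3 := pvScanDown grid height y x
        output ++ [pvFmt6 (x : Int) (y : Int) p2.1 p2.2 p3.1 p3.2]
      else output) output) []

-- ===== PORT B =====
-- nxt = [y if row[x] == '0' else nxt[x] for x in range(width)]
def pvNxtUpdate (grid : List String) (width y : Nat) (nxt : List Int) : List Int :=
  (List.range width).map (fun x => if pvCell grid y x then (y : Int) else nxt.getD x (-1))

-- the bottom-up loop 'for y in range(height-1, -1, -1)' with below.append(nxt), then below.reverse()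
def pvBuildBelow (grid : List String) (width : Nat) : List (List Int) :=
  (((List.range grid.length).reverse.foldl
      (fun (st : List (List Int) × List Int) y =>
        (st.1 ++ [st.2], pvNxtUpdate grid width y st.2))
      ([], List.replicate width (-1))).1).reverse

-- f"{a} {b}"
def pvFmtPair (a b : Int) : List Char := PySem.Int.toChars a ++ [' '] ++ PySem.Int.toChars b

-- f"{x} {y} {r} {d}" with r, d the two conditional pair strings
def pvEntryB (x y : Nat) (right bx : Int) : String :=
  String.ofList (PySem.Int.toChars (x : Int) ++ [' '] ++ PySem.Int.toChars (y : Int) ++ [' ']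
    ++ (if right != -1 then pvFmtPair right (y : Int) else "-1 -1".toList) ++ [' ']
    ++ (if bx != -1 then pvFmtPair (x : Int) bx else "-1 -1".toList))

-- the right-to-left row pass with entries.append + entries.reverse()
def pvRowOut (grid : List String) (width y : Nat) (b : List Int) : List String :=
  (((List.range width).reverse.foldl
      (fun (st : List String × Int) x =>
        if pvCell grid y x then
          (st.1 ++ [pvEntryB x y st.2 (b.getD x (-1))], (x : Int))
        else st)
      ([], -1)).1).reverse

def find_closest_neighbors_alt (grid : List String) : List String :=
  let height := grid.length
  let width := (grid.getD 0 "").toList.length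
  let below := pvBuildBelow grid width
  (List.range height).foldl (fun out y => out ++ pvRowOut grid width y (below.getD y [])) []

-- ===== PRECONDITION & SPEC =====
-- Pre_ excludes exactly the inputs where Python A raises IndexError: the empty grid (grid[0])
-- and grids with a row shorter than the first row (grid[y][x] for x < width).
def Pre_find_closest_neighbors (grid : List String) : Prop :=
  grid ≠ [] ∧ ∀ r ∈ grid, (grid.getD 0 "").toList.length ≤ r.toList.length

instance (grid : List String) : Decidable (Pre_find_closest_neighbors grid) := by
  unfold Pre_find_closest_neighbors; infer_instance

def pvWitness_find_closest_neighbors : List String := ["0.0", ".0.", "0.0"]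

def Spec_find_closest_neighbors (grid : List String) (out : List String) : Prop :=
  out = find_closest_neighbors_alt grid

instance (grid : List String) (out : List String) : Decidable (Spec_find_closest_neighbors grid out) := by
  unfold Spec_find_closest_neighbors; infer_instance

-- ===== CLAIM (what is proved, stated in full; the proofs are below) =====
def Claim_equal_find_closest_neighbors : Prop :=
  ∀ (grid : List String), Dom_find_closest_neighbors grid →
    Pre_find_closest_neighbors grid →
    Spec_find_closest_neighbors grid (find_closest_neighbors grid)

-- ===== LEMMAS AND PROOFS =====

-- first index in [a, b) satisfying p, with fallback r
def pvScanFb (p : Nat → Bool) (a b : Nat) (r : Int) : Int :=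
  match (List.range' a (b - a)).find? p with
  | some i => (i : Int)
  | none => r

theorem pvScanFb_ge (p : Nat → Bool) {a b : Nat} (h : b ≤ a) (r : Int) :
    pvScanFb p a b r = r := by
  simp [pvScanFb, Nat.sub_eq_zero_of_le h]

theorem pvScanFb_succ (p : Nat → Bool) {a n : Nat} (h : a ≤ n) (r : Int) :
    pvScanFb p a (n+1) r = pvScanFb p a n (if p n then (n : Int) else r) := by
  have h1 : n + 1 - a = (n - a) + 1 := by omega
  have h2 : List.range' a (n + 1 - a) = List.range' a (n - a) ++ [a + (n - a)] := by
    rw [h1, List.range'_1_concat]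
  have h3 : a + (n - a) = n := by omega
  unfold pvScanFb
  rw [h2, h3, List.find?_append]
  cases hf : (List.range' a (n - a)).find? p with
  | some i => simp
  | none => by_cases hp : p n <;> simp [hp]

-- invariant of B's bottom-up pass: after processing rows n-1..0 the stored rows and nxt
-- are the per-column suffix scans with component-wise fallback g
theorem pvBelowInv (grid : List String) (width : Nat) (n : Nat) :
    ∀ (acc : List (List Int)) (g : Nat → Int),
      (List.range n).reverse.foldl
        (fun (st : List (List Int) × List Int) y =>
          (st.1 ++ [st.2], pvNxtUpdate grid width y st.2))
        (acc, (List.range width).map g)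
      = (acc ++ ((List.range n).map (fun y =>
            (List.range width).map (fun x => pvScanFb (fun yy => pvCell grid yy x) (y+1) n (g x)))).reverse,
         (List.range width).map (fun x => pvScanFb (fun yy => pvCell grid yy x) 0 n (g x))) := by
  induction n with
  | zero => intro acc g; simp [pvScanFb]
  | succ n ih =>
    intro acc g
    have hupd : pvNxtUpdate grid width n ((List.range width).map g)
        = (List.range width).map (fun x => if pvCell grid n x then (n : Int) else g x) := by
      unfold pvNxtUpdate
      refine List.map_congr_left ?_
      intro x hx
      rw [PySem.List.getD_map_range g width x (-1) (List.mem_range.mp hx)]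
    rw [List.range_succ, List.reverse_append, List.reverse_singleton]
    show (List.range n).reverse.foldl _ (acc ++ [(List.range width).map g], pvNxtUpdate grid width n ((List.range width).map g)) = _
    rw [hupd, ih (acc ++ [(List.range width).map g]) (fun x => if pvCell grid n x then (n : Int) else g x)]
    refine Prod.ext ?_ ?_
    · -- rows component
      simp only [List.map_append, List.reverse_append, List.reverse_singleton, List.map_cons,
        List.map_nil]
      have hlast : (List.range width).map
          (fun x => pvScanFb (fun yy => pvCell grid yy x) (n+1) (n+1) (g x)) = (List.range width).map g := by
        refine List.map_congr_left ?_
        intro x _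
        exact pvScanFb_ge _ le_rfl _
      rw [hlast]
      have hrows : (List.range n).map (fun y =>
            (List.range width).map (fun x => pvScanFb (fun yy => pvCell grid yy x) (y+1) n
              (if pvCell grid n x then (n : Int) else g x)))
          = (List.range n).map (fun y =>
            (List.range width).map (fun x => pvScanFb (fun yy => pvCell grid yy x) (y+1) (n+1) (g x))) := by
        refine List.map_congr_left ?_
        intro y hy
        refine List.map_congr_left ?_
        intro x _
        exact (pvScanFb_succ _ (Nat.succ_le_of_lt (List.mem_range.mp hy)) _).symm
      rw [hrows, List.append_assoc]
    · -- nxt component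
      refine List.map_congr_left ?_
      intro x _
      exact (pvScanFb_succ _ (Nat.zero_le n) _).symm

-- invariant of B's right-to-left row pass: entries so far (descending x) and the running 'right'
theorem pvRowInv (grid : List String) (y : Nat) (b : List Int) (n : Nat) :
    ∀ (acc : List String) (r : Int),
      (List.range n).reverse.foldl
        (fun (st : List String × Int) x =>
          if pvCell grid y x then
            (st.1 ++ [pvEntryB x y st.2 (b.getD x (-1))], (x : Int))
          else st)
        (acc, r)
      = (acc ++ (((List.range n).filter (fun x => pvCell grid y x)).map
            (fun x => pvEntryB x y (pvScanFb (fun xx => pvCell grid y xx) (x+1) n r) (b.getD x (-1)))).reverse,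
         pvScanFb (fun xx => pvCell grid y xx) 0 n r) := by
  induction n with
  | zero => intro acc r; simp [pvScanFb]
  | succ n ih =>
    intro acc r
    rw [List.range_succ, List.reverse_append, List.reverse_singleton]
    simp only [List.singleton_append, List.foldl_cons, List.filter_append, List.filter_cons,
      List.filter_nil]
    by_cases hc : pvCell grid y n
    · simp only [hc, if_true]
      rw [ih (acc ++ [pvEntryB n y r (b.getD n (-1))]) ((n : Int))]
      simp only [List.map_append, List.map_cons, List.map_nil,
        List.reverse_append, List.reverse_cons, List.reverse_nil, List.nil_append]
      refine Prod.ext ?_ ?_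
      · have h1 : ∀ x ∈ (List.range n).filter (fun x => pvCell grid y x),
            pvEntryB x y (pvScanFb (fun xx => pvCell grid y xx) (x+1) n ((n : Int))) (b.getD x (-1))
              = pvEntryB x y (pvScanFb (fun xx => pvCell grid y xx) (x+1) (n+1) r) (b.getD x (-1)) := by
          intro x hx
          have hxn : x < n := List.mem_range.mp (List.mem_filter.mp hx).1
          simp [pvScanFb_succ _ (Nat.succ_le_of_lt hxn) r, hc]
        rw [List.map_congr_left h1]
        have h2 : pvScanFb (fun xx => pvCell grid y xx) (n+1) (n+1) r = r := pvScanFb_ge _ le_rfl _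
        rw [h2, List.append_assoc]
      · show pvScanFb _ 0 n ((n : Int)) = pvScanFb _ 0 (n+1) r
        simp [pvScanFb_succ _ (Nat.zero_le n) r, hc]
    · simp only [hc, Bool.false_eq_true, if_false]
      rw [ih acc r]
      simp only [List.append_nil]
      refine Prod.ext ?_ ?_
      · have h1 : ∀ x ∈ (List.range n).filter (fun x => pvCell grid y x),
            pvEntryB x y (pvScanFb (fun xx => pvCell grid y xx) (x+1) n r) (b.getD x (-1))
              = pvEntryB x y (pvScanFb (fun xx => pvCell grid y xx) (x+1) (n+1) r) (b.getD x (-1)) := by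
          intro x hx
          have hxn : x < n := List.mem_range.mp (List.mem_filter.mp hx).1
          simp [pvScanFb_succ _ (Nat.succ_le_of_lt hxn) r, hc]
        rw [List.map_congr_left h1]
      · show pvScanFb _ 0 n r = pvScanFb _ 0 (n+1) r
        simp [pvScanFb_succ _ (Nat.zero_le n) r, hc]

-- A's per-node entry string equals B's: the two scans are the same find?, and a found
-- index is a Nat cast, hence never -1
theorem pvEntry_eq (grid : List String) (height width y x : Nat) :
    pvFmt6 (x : Int) (y : Int) (pvScanRight grid y width x).1 (pvScanRight grid y width x).2
      (pvScanDown grid height y x).1 (pvScanDown grid height y x).2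
    = pvEntryB x y (pvScanFb (fun xx => pvCell grid y xx) (x+1) width (-1))
        (pvScanFb (fun yy => pvCell grid yy x) (y+1) height (-1)) := by
  have hneg : "-1 -1".toList = PySem.Int.toChars (-1) ++ [' '] ++ PySem.Int.toChars (-1) := by decide
  unfold pvScanRight pvScanDown pvScanFb pvFmt6 pvEntryB pvFmtPair
  cases hR : (List.range' (x+1) (width - (x+1))).find? (fun xn => pvCell grid y xn) with
  | some xn =>
    have hxn : ((xn : Int) != -1) = true := by simp [bne_iff_ne]
    cases hD : (List.range' (y+1) (height - (y+1))).find? (fun yn => pvCell grid yn x) with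
    | some yn =>
      have hyn : ((yn : Int) != -1) = true := by simp [bne_iff_ne]
      simp only [hxn, hyn, if_true, List.append_assoc]
    | none =>
      have : ((-1 : Int) != -1) = false := by decide
      simp only [this, hxn, if_true, if_false, Bool.false_eq_true, hneg, List.append_assoc]
  | none =>
    have : ((-1 : Int) != -1) = false := by decide
    cases hD : (List.range' (y+1) (height - (y+1))).find? (fun yn => pvCell grid yn x) with
    | some yn =>
      have hyn : ((yn : Int) != -1) = true := by simp [bne_iff_ne]
      simp only [this, hyn, if_true, if_false, Bool.false_eq_true, hneg, List.append_assoc]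
    | none =>
      simp only [this, if_false, Bool.false_eq_true, hneg, List.append_assoc]

-- ===== VERDICT (by name: the statement is the Claim_ definition above) =====
theorem find_closest_neighbors_spec : Claim_equal_find_closest_neighbors := by
  intro grid _ _
  unfold Spec_find_closest_neighbors find_closest_neighbors find_closest_neighbors_alt
  dsimp only
  -- abbreviations
  generalize hw : (grid.getD 0 "").toList.length = w
  -- A's inner loop is append-if: filter + map (PySem.List.foldl_append_if)
  have hA : (fun (output : List String) (y : Nat) =>
        (List.range w).foldl (fun output x =>
          if pvCell grid y x then
            output ++ [pvFmt6 (x : Int) (y : Int)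
              (pvScanRight grid y w x).1 (pvScanRight grid y w x).2
              (pvScanDown grid grid.length y x).1 (pvScanDown grid grid.length y x).2]
          else output) output)
      = (fun (output : List String) (y : Nat) =>
        output ++ ((List.range w).filter (fun x => pvCell grid y x)).map
          (fun (x : Nat) => pvFmt6 (x : Int) (y : Int)
            (pvScanRight grid y w x).1 (pvScanRight grid y w x).2
            (pvScanDown grid grid.length y x).1 (pvScanDown grid grid.length y x).2)) := by
    funext output y
    exact PySem.List.foldl_append_if _ _ _ _
  rw [hA, PySem.List.foldl_append_eq_flatMap, PySem.List.foldl_append_eq_flatMap,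
    List.nil_append, List.nil_append]
  -- B's below table is the per-column suffix scan (pvBelowInv)
  have hrep : List.replicate w (-1 : Int) = (List.range w).map (fun _ => (-1 : Int)) := by
    rw [List.map_const', List.length_range]
  have hbelow : pvBuildBelow grid w = (List.range grid.length).map (fun y =>
      (List.range w).map (fun x => pvScanFb (fun yy => pvCell grid yy x) (y+1) grid.length (-1))) := by
    unfold pvBuildBelow
    rw [hrep, pvBelowInv grid w grid.length [] (fun _ => (-1 : Int))]
    simp only [List.nil_append, List.reverse_reverse]
  rw [hbelow]
  -- row by row
  refine List.flatMap_congr ?_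
  intro y hy
  have hyh : y < grid.length := List.mem_range.mp hy
  rw [PySem.List.getD_map_range _ _ _ _ hyh]
  unfold pvRowOut
  rw [pvRowInv grid y _ w [] (-1)]
  simp only [List.nil_append, List.reverse_reverse]
  refine List.map_congr_left ?_
  intro x hx
  have hxw : x < w := List.mem_range.mp (List.mem_filter.mp hx).1
  rw [PySem.List.getD_map_range _ _ _ _ hxw]
  exact pvEntry_eq grid grid.length w y x
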